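-- pv_equiv track=rewrite | github.com/eoeefosa/python-bing-cleaner | main.py | removes_spaces
-- ===== SOURCE A (Python) =====
-- def removes_spaces(text):
--   # Initialize an empty string to store the output
--   output = ""
--   # Initialize a counter to keep track of consecutive spaces
--   space_count = 0
--   # Loop through each character in the text
--   for char in text:
--     # If the character is not a space, append it to the output and reset the space count
--     if char != " ":
--       output += char
--       space_count = 0
--     # If the character is a space and the space count is less than 2, append it to the output and increment the space count
--     elif space_count < 2:
--       output += char
--       space_count += 1
--     # If the character is a space and the space count is equal to or greater than 2, ignore it and do nothing
--     else:
--       pass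
--   # Return the output string
--   return output
-- ===== SOURCE B (Python) =====
-- def removes_spaces(text):
--     # Run-based scan: copy each maximal run, capping space runs at two spaces.
--     parts = []
--     i = 0
--     n = len(text)
--     while i < n:
--         j = i
--         if text[i] == " ":
--             while j < n and text[j] == " ":
--                 j += 1
--             parts.append(" " * min(2, j - i))
--         else:
--             while j < n and text[j] != " ":
--                 j += 1
--             parts.append(text[i:j])
--         i = j
--     return "".join(parts)
-- ===== Notes on version B (the rewrite author's own statement) =====
-- stated objective: alternative
-- what changed: Replaces the per-character loop with a space counter by a two-pointer run scanner that copies maximal runs at once, emitting min(2, run length) spaces for each space run, joined at the end.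
import Mathlib
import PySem

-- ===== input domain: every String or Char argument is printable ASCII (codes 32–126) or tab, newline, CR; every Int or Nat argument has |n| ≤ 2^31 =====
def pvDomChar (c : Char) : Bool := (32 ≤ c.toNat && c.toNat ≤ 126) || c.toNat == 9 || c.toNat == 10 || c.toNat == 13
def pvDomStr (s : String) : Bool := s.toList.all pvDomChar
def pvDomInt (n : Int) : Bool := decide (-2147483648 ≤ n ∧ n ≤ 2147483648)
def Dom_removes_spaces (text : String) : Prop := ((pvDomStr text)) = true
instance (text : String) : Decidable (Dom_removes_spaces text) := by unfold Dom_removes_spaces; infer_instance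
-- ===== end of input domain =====

-- B replaces A's per-character loop (space counter) by a two-pointer run scanner: alternative decomposition, same cost.


-- ===== PORT A =====
-- literal transliteration: fold over the characters with (output, space_count) state
def aStep (st : List Char × Nat) (char : Char) : List Char × Nat :=
  if char ≠ ' ' then (st.1 ++ [char], 0)
  else if st.2 < 2 then (st.1 ++ [char], st.2 + 1)
  else st

def removes_spaces (text : String) : String :=
  String.mk ((text.toList.foldl aStep (([] : List Char), 0)).1)

-- ===== PORT B =====
-- run scanner: each step consumes one maximal run (of spaces, or of non-spaces)
def bGo : List Char → List Char
  | [] => []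
  | c :: cs =>
    if h : c = ' ' then
      List.replicate (min 2 ((c :: cs).takeWhile (· = ' ')).length) ' '
        ++ bGo ((c :: cs).dropWhile (· = ' '))
    else
      (c :: cs).takeWhile (· ≠ ' ') ++ bGo ((c :: cs).dropWhile (· ≠ ' '))
  termination_by l => l.length
  decreasing_by
  · simp [List.dropWhile, h]
    exact List.length_dropWhile_le _ _
  · simp [List.dropWhile, h]
    exact List.length_dropWhile_le _ _

def removes_spaces_alt (text : String) : String :=
  String.mk (bGo text.toList)

-- ===== PRECONDITION & SPEC =====
def Spec_removes_spaces (text : String) (out : String) : Prop := out = removes_spaces_alt text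
instance (text : String) (out : String) : Decidable (Spec_removes_spaces text out) := by unfold Spec_removes_spaces; infer_instance

-- ===== CLAIM (what is proved, stated in full; the proofs are below) =====
def Claim_equal_removes_spaces : Prop := ∀ (text : String), Dom_removes_spaces text → Spec_removes_spaces text (removes_spaces text)

-- ===== LEMMAS AND PROOFS =====

-- pure version of A's loop body, recursing on the remaining characters
def aGo : Nat → List Char → List Char
  | _, [] => []
  | k, c :: cs =>
    if c ≠ ' ' then c :: aGo 0 cs
    else if k < 2 then c :: aGo (k + 1) cs
    else aGo k cs

theorem foldl_aGo (cs : List Char) (out : List Char) (k : Nat) :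
    (cs.foldl aStep (out, k)).1 = out ++ aGo k cs := by
  induction cs generalizing out k with
  | nil => simp [aGo]
  | cons c cs ih =>
    by_cases h1 : c = ' '
    · by_cases h2 : k < 2
      · have hs : aStep (out, k) c = (out ++ [c], k + 1) := by simp [aStep, h1, h2]
        rw [List.foldl_cons, hs, ih]
        simp [aGo, h1, h2]
      · have hs : aStep (out, k) c = (out, k) := by simp [aStep, h1, h2]
        rw [List.foldl_cons, hs, ih]
        simp [aGo, h1, h2]
    · have hs : aStep (out, k) c = (out ++ [c], 0) := by simp [aStep, h1]
      rw [List.foldl_cons, hs, ih]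
      simp [aGo, h1]

theorem aGo_skip (m : Nat) (rest : List Char) :
    aGo 2 (List.replicate m ' ' ++ rest) = aGo 2 rest := by
  induction m with
  | zero => simp
  | succ m ih => simp [List.replicate_succ, aGo, ih]

theorem aGo_head_nonspace (k : Nat) (rest : List Char)
    (h : ∀ d ∈ rest.head?, d ≠ ' ') : aGo k rest = aGo 0 rest := by
  cases rest with
  | nil => rfl
  | cons d ds =>
    have hd : d ≠ ' ' := h d (by simp)
    simp [aGo, hd]

theorem aGo_space_run (n : Nat) (rest : List Char)
    (h : ∀ d ∈ rest.head?, d ≠ ' ') :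
    aGo 0 (List.replicate n ' ' ++ rest)
      = List.replicate (min 2 n) ' ' ++ aGo 0 rest := by
  match n with
  | 0 => simp
  | 1 =>
    simp [List.replicate_succ, aGo, aGo_head_nonspace 1 rest h]
  | (m + 2) =>
    simp [List.replicate_succ, aGo, aGo_skip, aGo_head_nonspace 2 rest h]

theorem aGo_nonspace_run (run rest : List Char) (h : ∀ c ∈ run, c ≠ ' ') :
    aGo 0 (run ++ rest) = run ++ aGo 0 rest := by
  induction run with
  | nil => simp
  | cons a run ih =>
    have ha : a ≠ ' ' := h a (by simp)
    simp only [List.cons_append, aGo, if_pos ha]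
    simp [ih (fun c hc => h c (by simp [hc]))]

theorem takeWhile_space_replicate (l : List Char) :
    l.takeWhile (· = ' ') = List.replicate (l.takeWhile (· = ' ')).length ' ' := by
  rw [List.eq_replicate_iff]
  exact ⟨rfl, fun b hb => by simpa using List.mem_takeWhile_imp hb⟩

theorem head_dropWhile {p : Char → Bool} (l : List Char)
    (d : Char) (hd : d ∈ (l.dropWhile p).head?) : ¬ p d := by
  have := List.head?_dropWhile_not p l
  cases hmem : (l.dropWhile p).head? with
  | none => simp [hmem] at hd
  | some x =>
    simp [hmem] at hd this
    subst hd; simp [this]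

theorem aGo_eq_bGo : ∀ (n : Nat) (cs : List Char), cs.length ≤ n → aGo 0 cs = bGo cs := by
  intro n
  induction n with
  | zero =>
    intro cs hcs
    have : cs = [] := List.eq_nil_of_length_eq_zero (Nat.le_zero.mp hcs)
    subst this; simp [aGo, bGo]
  | succ n ih =>
    intro cs hcs
    cases cs with
    | nil => simp [aGo, bGo]
    | cons c cs =>
      by_cases h : c = ' '
      · rw [bGo, dif_pos h]
        have hdec := List.takeWhile_append_dropWhile (p := (· = ' ')) (l := c :: cs)
        have hrep := takeWhile_space_replicate (c :: cs)
        have hlen : ((c :: cs).dropWhile (· = ' ')).length < (c :: cs).length := by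
          simp [List.dropWhile, h]
          exact List.length_dropWhile_le _ _
        have hhead : ∀ d ∈ ((c :: cs).dropWhile (· = ' ')).head?, d ≠ ' ' := by
          intro d hd
          have := head_dropWhile (p := (· = ' ')) (c :: cs) d hd
          simpa using this
        calc aGo 0 (c :: cs)
            = aGo 0 ((c :: cs).takeWhile (· = ' ') ++ (c :: cs).dropWhile (· = ' ')) := by
              rw [hdec]
          _ = List.replicate (min 2 ((c :: cs).takeWhile (· = ' ')).length) ' '
                ++ aGo 0 ((c :: cs).dropWhile (· = ' ')) := by
              conv_lhs => rw [hrep]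
              exact aGo_space_run _ _ hhead
          _ = List.replicate (min 2 ((c :: cs).takeWhile (· = ' ')).length) ' '
                ++ bGo ((c :: cs).dropWhile (· = ' ')) := by
              rw [ih _ (by omega)]
      · rw [bGo, dif_neg h]
        have hdec := List.takeWhile_append_dropWhile (p := (· ≠ ' ')) (l := c :: cs)
        have hlen : ((c :: cs).dropWhile (· ≠ ' ')).length < (c :: cs).length := by
          simp [List.dropWhile, h]
          exact List.length_dropWhile_le _ _
        have hall : ∀ x ∈ (c :: cs).takeWhile (· ≠ ' '), x ≠ ' ' := by
          intro x hx
          simpa using List.mem_takeWhile_imp hx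
        calc aGo 0 (c :: cs)
            = aGo 0 ((c :: cs).takeWhile (· ≠ ' ') ++ (c :: cs).dropWhile (· ≠ ' ')) := by
              rw [hdec]
          _ = (c :: cs).takeWhile (· ≠ ' ') ++ aGo 0 ((c :: cs).dropWhile (· ≠ ' ')) :=
              aGo_nonspace_run _ _ hall
          _ = (c :: cs).takeWhile (· ≠ ' ') ++ bGo ((c :: cs).dropWhile (· ≠ ' ')) := by
              rw [ih _ (by omega)]

-- ===== VERDICT (by name: the statement is the Claim_ definition above) =====
theorem removes_spaces_spec : Claim_equal_removes_spaces := by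
  intro text _
  unfold Spec_removes_spaces removes_spaces removes_spaces_alt
  rw [foldl_aGo, aGo_eq_bGo text.toList.length text.toList (le_refl _)]
  rfl
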